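-- pv_equiv track=rewrite | github.com/DonggeonOh/algorithm-python | algorithm/problems/hackerrank/miscellaneous/friend_circle_queries.py | max_circle_union_find_array
-- ===== SOURCE A (Python) =====
-- from collections import defaultdict
--
-- def max_circle_union_find_array(queries):
--     """
--     해커랭크 Friend Circle Queries 솔루션 - Union find 배열 구현
--
--     union 시 갯수도 같이 세도록 구현했지만 시간초과 발생
--     추후 Tree로 재구현 필요 (https://en.wikipedia.org/wiki/Disjoint-set_data_structure)
--
--     @Date: 2021/12/24
--     @Author: Oh Donggeon
--     @Link: https://www.hackerrank.com/challenges/friend-circle-queries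
--     """
--     circledict = defaultdict(int)
--     answer = list()
--
--     for query in queries:
--         countdict = defaultdict(int)
--         friendA = query[0]
--         friendB = query[1]
--
--         answer.append(union(circledict, countdict, friendA, friendB))
--
--     return answer
--
-- def union(circledict, countdict, friendA, friendB):
--     leftval = find(circledict, friendA)
--     rightval = find(circledict, friendB)
--     maxval = max(countdict[leftval], countdict[rightval])
--
--     for key in circledict:
--         if circledict[key] == rightval:
--             circledict[key] = leftval
--             countdict[leftval] = countdict[leftval] + 1 if countdict[leftval] else 1
--             maxval = max(maxval, countdict[leftval])
--             continue
--
--         if countdict[circledict[key]]: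
--             countdict[circledict[key]] += 1
--         else:
--             countdict[circledict[key]] = 1
--
--         maxval = max(maxval, countdict[circledict[key]])
--
--     return maxval
--
-- def find(circledict, key):
--     if not circledict[key]:
--         circledict[key] = key
--
--     return circledict[key]
-- ===== SOURCE B (Python) =====
-- def max_circle_union_find_array(queries):
--     """Quick-find with per-circle member lists and a running maximum:
--     each union relabels only the absorbed circle's members instead of
--     rescanning and recounting every id seen so far."""
--     root = {}
--     members = {}
--     best = 0
--     answer = []
--     for query in queries:
--         a = query[0]
--         b = query[1]
--         if a not in root:
--             root[a] = a
--             members[a] = [a]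
--         if b not in root:
--             root[b] = b
--             members[b] = [b]
--         ra = root[a]
--         rb = root[b]
--         if ra != rb:
--             for k in members[rb]:
--                 root[k] = ra
--             members[ra].extend(members[rb])
--             del members[rb]
--         best = max(best, len(members[ra]))
--         answer.append(best)
--     return answer
-- ===== Notes on version B (the rewrite author's own statement) =====
-- stated objective: faster
-- what changed: A rescans every id seen so far and recounts all circle sizes from scratch with two defaultdicts on every query; B keeps a flat root map plus per-circle member lists and a running maximum, so each union relabels only the absorbed circle's members.
-- outside the precondition, e.g. on max_circle_union_find_array([[0, 1], [1, 2]]): A returns [2, 2], B returns [2, 3]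
import Mathlib
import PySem

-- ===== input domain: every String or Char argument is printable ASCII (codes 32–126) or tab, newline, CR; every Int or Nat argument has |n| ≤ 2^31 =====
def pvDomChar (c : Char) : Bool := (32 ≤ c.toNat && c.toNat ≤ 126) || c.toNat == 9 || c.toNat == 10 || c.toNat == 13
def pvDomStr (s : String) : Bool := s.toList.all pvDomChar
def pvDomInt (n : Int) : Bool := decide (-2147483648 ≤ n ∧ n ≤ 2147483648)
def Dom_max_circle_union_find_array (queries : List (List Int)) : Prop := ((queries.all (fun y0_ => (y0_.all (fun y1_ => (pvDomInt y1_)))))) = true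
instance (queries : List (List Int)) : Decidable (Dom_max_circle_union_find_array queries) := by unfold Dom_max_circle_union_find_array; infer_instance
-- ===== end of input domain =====

-- B replaces A's per-query full rescan-and-recount (two defaultdicts rebuilt per query) by a flat
-- root map with per-circle member lists and a running maximum, relabelling only the absorbed circle.


-- ===== PORT A =====
-- find(circledict, key): a defaultdict(int) access inserts 0 for a missing key; 'not circledict[key]' is 'value = 0'
def findCircle (c : PySem.Dict Int Int) (key : Int) : PySem.Dict Int Int × Int :=
  let c1 := if c.contains key then c else c.insert key 0
  if c1.getD key 0 = 0 then
    let c2 := c1.insert key key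
    (c2, c2.getD key 0)
  else (c1, c1.getD key 0)

-- the body of 'for key in circledict' inside union (state: circledict, countdict, maxval)
def unionLoopStep (leftval rightval : Int)
    (s : PySem.Dict Int Int × PySem.Dict Int Int × Int) (key : Int) :
    PySem.Dict Int Int × PySem.Dict Int Int × Int :=
  if s.1.getD key 0 = rightval then
    let c' := s.1.insert key leftval
    let cl := (s.2.1).getD leftval 0
    let cnt' := (s.2.1).insert leftval (if cl ≠ 0 then cl + 1 else 1)
    (c', cnt', max s.2.2 (cnt'.getD leftval 0))
  else
    let r := s.1.getD key 0
    let cr := (s.2.1).getD r 0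
    let cnt' := (s.2.1).insert r (if cr ≠ 0 then cr + 1 else 1)
    (s.1, cnt', max s.2.2 (cnt'.getD r 0))

def unionCircle (c : PySem.Dict Int Int) (friendA friendB : Int) : PySem.Dict Int Int × Int :=
  let fa := findCircle c friendA
  let leftval := fa.2
  let fb := findCircle fa.1 friendB
  let c2 := fb.1
  let rightval := fb.2
  -- countdict = defaultdict(int); countdict[leftval] / countdict[rightval] insert 0 entries
  let cnt0 : PySem.Dict Int Int := PySem.Dict.empty
  let cnt1 := if cnt0.contains leftval then cnt0 else cnt0.insert leftval 0
  let cnt2 := if cnt1.contains rightval then cnt1 else cnt1.insert rightval 0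
  let maxval := max (cnt2.getD leftval 0) (cnt2.getD rightval 0)
  let res := (c2.keys).foldl (unionLoopStep leftval rightval) (c2, cnt2, maxval)
  (res.1, res.2.2)

def max_circle_union_find_array (queries : List (List Int)) : List Int :=
  (queries.foldl (fun (s : PySem.Dict Int Int × List Int) query =>
      let friendA := PySem.List.pyGetD query 0 0
      let friendB := PySem.List.pyGetD query 1 0
      let r := unionCircle s.1 friendA friendB
      (r.1, s.2 ++ [r.2])) (PySem.Dict.empty, [])).2

-- ===== PORT B =====
-- state: (root, members, best, answer); each union relabels only the absorbed circle's members
def altStep (s : PySem.Dict Int Int × PySem.Dict Int (List Int) × Int × List Int)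
    (query : List Int) : PySem.Dict Int Int × PySem.Dict Int (List Int) × Int × List Int :=
  let a := PySem.List.pyGetD query 0 0
  let b := PySem.List.pyGetD query 1 0
  let rm1 := if (s.1).contains a then (s.1, s.2.1) else ((s.1).insert a a, (s.2.1).insert a [a])
  let rm2 := if (rm1.1).contains b then rm1 else ((rm1.1).insert b b, (rm1.2).insert b [b])
  let ra := (rm2.1).getD a 0
  let rb := (rm2.1).getD b 0
  let rm3 :=
    if ra ≠ rb then
      let ml := (rm2.2).getD rb []
      (ml.foldl (fun r k => r.insert k ra) rm2.1,
       ((rm2.2).insert ra (((rm2.2).getD ra []) ++ ml)).erase rb)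
    else rm2
  let best' := max s.2.2.1 (((rm3.2).getD ra []).length : Int)
  (rm3.1, rm3.2, best', s.2.2.2 ++ [best'])

def max_circle_union_find_array_alt (queries : List (List Int)) : List Int :=
  (queries.foldl altStep (PySem.Dict.empty, PySem.Dict.empty, 0, [])).2.2.2

-- ===== PRECONDITION & SPEC =====
-- Pre_ excludes queries with fewer than two entries (A raises IndexError there) and queries whose
-- first two entries include friend id 0: 0 collides with the 0-means-'unseen' sentinel of A's
-- defaultdict find, so A's returned sizes there are an accident of that encoding (B returns the
-- true circle sizes on such inputs).
def Pre_max_circle_union_find_array (queries : List (List Int)) : Prop :=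
  ∀ q ∈ queries, 2 ≤ q.length ∧ q.getD 0 0 ≠ 0 ∧ q.getD 1 0 ≠ 0
instance (queries : List (List Int)) : Decidable (Pre_max_circle_union_find_array queries) := by
  unfold Pre_max_circle_union_find_array; infer_instance

def pvWitness_max_circle_union_find_array : List (List Int) := [[1, 2], [3, 4], [2, 3], [-5, 1]]

def Spec_max_circle_union_find_array (queries : List (List Int)) (out : List Int) : Prop :=
  out = max_circle_union_find_array_alt queries
instance (queries : List (List Int)) (out : List Int) :
    Decidable (Spec_max_circle_union_find_array queries out) := by
  unfold Spec_max_circle_union_find_array; infer_instance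

-- ===== CLAIM (what is proved, stated in full; the proofs are below) =====
def Claim_equal_max_circle_union_find_array : Prop :=
  ∀ (queries : List (List Int)), Dom_max_circle_union_find_array queries →
    Pre_max_circle_union_find_array queries →
    Spec_max_circle_union_find_array queries (max_circle_union_find_array queries)

-- ===== LEMMAS AND PROOFS =====

-- ===== proof-side helpers =====
def relabP (rv lv : Int) (p : Int × Int) : Int × Int := (p.1, if p.2 = rv then lv else p.2)

def relabelD (rv lv : Int) (d : PySem.Dict Int Int) : PySem.Dict Int Int :=
  PySem.Dict.mk (d.items.map (relabP rv lv))

def insKey (d : PySem.Dict Int Int) (k : Int) : PySem.Dict Int Int :=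
  if d.contains k then d else PySem.Dict.mk (d.items ++ [(k, k)])

def rootOf (d : PySem.Dict Int Int) (k : Int) : Int := (d.get? k).getD k

def cntStep (s : PySem.Dict Int Int × Int) (v : Int) : PySem.Dict Int Int × Int :=
  (s.1.insert v (s.1.getD v 0 + 1), max s.2 (s.1.getD v 0 + 1))

def maxFiber (d : PySem.Dict Int Int) : Int :=
  ((d.values).map (fun v => ((d.values).count v : Int))).foldl max 0

def bestOf (mem : PySem.Dict Int (List Int)) : Int :=
  ((mem.values).map (fun l => (l.length : Int))).foldl max 0

def InvCM (c : PySem.Dict Int Int) (mem : PySem.Dict Int (List Int)) : Prop :=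
  c.keys.Nodup ∧ mem.keys.Nodup ∧
  (∀ p ∈ c.items, p.2 = 0 → p.1 = 0) ∧
  (∀ p ∈ c.items, p.2 ∈ c.keys) ∧
  (∀ r l, mem.get? r = some l → l ≠ [] ∧ l.Nodup ∧ (∀ k, k ∈ l ↔ c.get? k = some r)) ∧
  (∀ r, mem.get? r = none → ∀ k, c.get? k ≠ some r)

-- ===== generic foldl-max facts =====
theorem foldl_max_le_iff (l : List Int) (s z : Int) :
    l.foldl max s ≤ z ↔ s ≤ z ∧ ∀ x ∈ l, x ≤ z := by
  induction l generalizing s with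
  | nil => simp
  | cons x t ih =>
    simp only [List.foldl_cons, ih, List.mem_cons]
    constructor
    · rintro ⟨h1, h2⟩
      exact ⟨le_trans (le_max_left _ _) h1,
        fun y hy => hy.elim (fun e => e ▸ le_trans (le_max_right _ _) h1) (h2 y)⟩
    · rintro ⟨h1, h2⟩
      exact ⟨max_le h1 (h2 x (Or.inl rfl)), fun y hy => h2 y (Or.inr hy)⟩

theorem foldl_max_seed_eq (l : List Int) (s t : Int) (h1 : s ≤ t) (h2 : t ≤ l.foldl max s) :
    l.foldl max t = l.foldl max s := by
  refine le_antisymm ?_ ?_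
  · exact (foldl_max_le_iff l t _).mpr ⟨h2, fun x hx => (PySem.List.le_foldl_max l s).2 x hx⟩
  · exact (foldl_max_le_iff l s _).mpr
      ⟨le_trans h1 (PySem.List.le_foldl_max l t).1, fun x hx => (PySem.List.le_foldl_max l t).2 x hx⟩

-- ===== generic dict-as-list facts =====
theorem get?_mk_append_of_not_mem (l1 l2 : List (Int × Int)) (k : Int)
    (h : ∀ p ∈ l1, p.1 ≠ k) :
    (PySem.Dict.mk (l1 ++ l2)).get? k = (PySem.Dict.mk l2).get? k := by
  induction l1 with
  | nil => simp
  | cons p t ih =>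
    have hp : p.1 ≠ k := h p (by simp)
    rw [List.cons_append]
    rw [show ((p :: (t ++ l2)) : List (Int × Int)) = (p.1, p.2) :: (t ++ l2) by simp]
    rw [PySem.Dict.get?_mk_cons]
    simp only [beq_iff_eq, hp, if_false]
    exact ih (fun q hq => h q (by simp [hq]))

theorem get?_mk_append_left {ν : Type} (l1 l2 : List (Int × ν)) (k : Int) (v : ν)
    (h : (PySem.Dict.mk l1).get? k = some v) :
    (PySem.Dict.mk (l1 ++ l2)).get? k = some v := by
  induction l1 with
  | nil => simp [PySem.Dict.get?] at h
  | cons p t ih =>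
    rw [show ((p :: t) : List (Int × ν)) = (p.1, p.2) :: t by simp] at h
    rw [PySem.Dict.get?_mk_cons] at h
    rw [List.cons_append, show ((p :: (t ++ l2)) : List (Int × ν)) = (p.1, p.2) :: (t ++ l2) by simp,
      PySem.Dict.get?_mk_cons]
    by_cases hk : (p.1 == k) = true
    · simpa [hk] using h
    · simp only [hk, if_false] at h ⊢
      exact ih h

theorem get?_erase {ν : Type} (d : PySem.Dict Int ν) (k j : Int) :
    (d.erase k).get? j = if j = k then none else d.get? j := by
  obtain ⟨l⟩ := d
  induction l with
  | nil => simp [PySem.Dict.erase, PySem.Dict.get?]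
  | cons p t ih =>
    simp only [PySem.Dict.erase, PySem.Dict.items] at ih ⊢
    by_cases hpk : (p.1 == k) = true
    · rw [show (List.filter (fun p => !p.1 == k) (p :: t)) = List.filter (fun p => !p.1 == k) t by
        simp [List.filter_cons, hpk]]
      rw [ih]
      by_cases hjk : j = k
      · simp [hjk]
      · simp only [hjk, if_false]
        rw [show ((p :: t) : List (Int × ν)) = (p.1, p.2) :: t by simp, PySem.Dict.get?_mk_cons]
        have : (p.1 == j) = false := by
          simp only [beq_eq_false_iff_ne]
          intro he; exact hjk (by rw [← he]; exact (beq_iff_eq.mp hpk))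
        simp [this]
    · rw [show (List.filter (fun p => !p.1 == k) (p :: t)) =
          p :: List.filter (fun p => !p.1 == k) t by simp [List.filter_cons, hpk]]
      rw [show ((p :: List.filter (fun q => !q.1 == k) t) : List (Int × ν))
            = (p.1, p.2) :: List.filter (fun q => !q.1 == k) t by simp,
        PySem.Dict.get?_mk_cons,
        show ((p :: t) : List (Int × ν)) = (p.1, p.2) :: t by simp, PySem.Dict.get?_mk_cons]
      by_cases hpj : (p.1 == j) = true
      · have hjk : j ≠ k := by
          intro he
          rw [beq_iff_eq.mp hpj, he] at hpk
          simp at hpk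
        simp [hpj, hjk]
      · simp only [hpj, if_false]
        exact ih

theorem nodup_keys_erase {ν : Type} (d : PySem.Dict Int ν) (k : Int)
    (h : d.keys.Nodup) : (d.erase k).keys.Nodup := by
  have hsub : (d.erase k).keys.Sublist d.keys := by
    simp only [PySem.Dict.erase, PySem.Dict.keys]
    exact List.Sublist.map _ (List.filter_sublist)
  exact hsub.nodup h

theorem mem_values_of_get? {ν : Type} (d : PySem.Dict Int ν) (k : Int) (v : ν)
    (h : d.get? k = some v) : v ∈ d.values := by
  have := PySem.Dict.mem_items_of_get?_eq_some d h
  simp only [PySem.Dict.values]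
  exact List.mem_map.mpr ⟨(k, v), this, rfl⟩

theorem exists_get?_of_mem_values {ν : Type} (d : PySem.Dict Int ν) (v : ν)
    (hnd : d.keys.Nodup) (h : v ∈ d.values) : ∃ k, d.get? k = some v := by
  simp only [PySem.Dict.values, List.mem_map] at h
  obtain ⟨p, hp, hv⟩ := h
  exact ⟨p.1, by
    have : (p.1, p.2) ∈ d.items := by simpa using hp
    rw [PySem.Dict.get?_of_mem_items d this hnd, hv]⟩

-- ===== relabel facts =====
theorem relabP_self (r : Int) : relabP r r = id := by
  funext p
  simp only [relabP, id_eq]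
  split
  · next h => exact Prod.ext rfl h.symm
  · rfl

theorem relabelD_self (r : Int) (d : PySem.Dict Int Int) : relabelD r r d = d := by
  obtain ⟨l⟩ := d
  simp [relabelD, relabP_self]

theorem keys_relabelD (rv lv : Int) (d : PySem.Dict Int Int) :
    (relabelD rv lv d).keys = d.keys := by
  simp [relabelD, PySem.Dict.keys, List.map_map, relabP, Function.comp_def]

theorem get?_relabelD (rv lv : Int) (d : PySem.Dict Int Int) (k : Int) :
    (relabelD rv lv d).get? k = (d.get? k).map (fun v => if v = rv then lv else v) := by
  obtain ⟨l⟩ := d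
  induction l with
  | nil => simp [relabelD, PySem.Dict.get?]
  | cons p t ih =>
    simp only [relabelD, PySem.Dict.items] at ih ⊢
    rw [List.map_cons,
      show (relabP rv lv p) = (p.1, if p.2 = rv then lv else p.2) from rfl,
      PySem.Dict.get?_mk_cons,
      show ((p :: t) : List (Int × Int)) = (p.1, p.2) :: t by simp, PySem.Dict.get?_mk_cons]
    by_cases hk : (p.1 == k) = true
    · simp [hk]
    · simp only [hk, if_false]
      exact ih

theorem values_relabelD (rv lv : Int) (d : PySem.Dict Int Int) :
    (relabelD rv lv d).values = d.values.map (fun v => if v = rv then lv else v) := by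
  simp [relabelD, PySem.Dict.values, List.map_map, relabP, Function.comp_def]


theorem map_replace_of_not_mem {ν : Type} (l : List (Int × ν)) (k : Int) (v : ν)
    (h : ∀ p ∈ l, p.1 ≠ k) :
    l.map (fun p => if (p.1 == k) = true then (k, v) else p) = l := by
  have : ∀ p ∈ l, (if (p.1 == k) = true then (k, v) else p) = id p := by
    intro p hp; simp [h p hp]
  rw [List.map_congr_left this, List.map_id]

theorem not_mem_keys_of_not_contains {ν : Type} (c : PySem.Dict Int ν) (k : Int)
    (hc : c.contains k = false) : ∀ p ∈ c.items, p.1 ≠ k := by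
  intro p hp
  simp only [PySem.Dict.contains, List.any_eq_false] at hc
  simpa using hc p hp

theorem get?_insKey (c : PySem.Dict Int Int) (k j : Int) :
    (insKey c k).get? j = if j = k then some ((c.get? k).getD k) else c.get? j := by
  unfold insKey
  by_cases hc : c.contains k = true
  · simp only [hc, if_true]
    by_cases hj : j = k
    · subst hj
      have hs : (c.get? j).isSome := by rw [← PySem.Dict.contains_eq_isSome_get?]; exact hc
      obtain ⟨v, hv⟩ := Option.isSome_iff_exists.mp hs
      simp [hv]
    · simp [hj]
  · have hc' : c.contains k = false := by simpa using hc
    have hnone : c.get? k = none := (PySem.Dict.get?_eq_none_iff_contains c k).mpr hc'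
    simp only [hc', Bool.false_eq_true, if_false]
    by_cases hj : j = k
    · subst hj
      rw [get?_mk_append_of_not_mem _ _ _ (not_mem_keys_of_not_contains c j hc')]
      simp [hnone, PySem.Dict.get?_mk_cons]
    · simp only [hj, if_false]
      cases hcj : c.get? j with
      | some v => exact get?_mk_append_left _ _ _ _ hcj
      | none =>
        have hfind : c.items.find? (fun p => p.1 == j) = none := by
          simpa [PySem.Dict.get?, Option.map_eq_none_iff] using hcj
        have hall : ∀ p ∈ c.items, p.1 ≠ j := by
          intro p hp
          simpa using List.find?_eq_none.mp hfind p hp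
        rw [get?_mk_append_of_not_mem _ _ _ hall]
        simp only [PySem.Dict.get?]
        rw [List.find?_cons_of_neg, List.find?_nil]
        · rfl
        · simp only [beq_iff_eq]
          exact fun hkj => hj hkj.symm

theorem keys_insKey (c : PySem.Dict Int Int) (k : Int) :
    (insKey c k).keys = if c.contains k then c.keys else c.keys ++ [k] := by
  unfold insKey
  by_cases hc : c.contains k = true <;> simp [hc, PySem.Dict.keys]

theorem nodup_keys_insKey (c : PySem.Dict Int Int) (k : Int) (h : c.keys.Nodup) :
    (insKey c k).keys.Nodup := by
  rw [keys_insKey]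
  by_cases hc : c.contains k = true
  · simpa [hc] using h
  · have hc' : c.contains k = false := by simpa using hc
    simp only [hc, Bool.false_eq_true, if_false]
    have hk : k ∉ c.keys := by
      intro hmem
      simp only [PySem.Dict.keys, List.mem_map] at hmem
      obtain ⟨p, hp, he⟩ := hmem
      exact not_mem_keys_of_not_contains c k hc' p hp he
    simp only [List.nodup_append, h, List.nodup_cons, List.nodup_nil, List.not_mem_nil,
      not_false_iff, and_true, true_and]
    exact fun a ha b hb => by simp only [List.mem_singleton] at hb; exact hb ▸ fun he => hk (he ▸ ha)

theorem items_insKey (c : PySem.Dict Int Int) (k : Int) :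
    (insKey c k).items = if c.contains k then c.items else c.items ++ [(k, k)] := by
  unfold insKey
  by_cases hc : c.contains k = true <;> simp [hc]

theorem findCircle_eq (c : PySem.Dict Int Int) (k : Int)
    (hz : ∀ p ∈ c.items, p.2 = 0 → p.1 = 0) (hk : k ≠ 0) :
    findCircle c k = (insKey c k, rootOf c k) := by
  unfold findCircle
  by_cases hc : c.contains k = true
  · have hs : (c.get? k).isSome := by rw [← PySem.Dict.contains_eq_isSome_get?]; exact hc
    obtain ⟨v, hv⟩ := Option.isSome_iff_exists.mp hs
    have hvne : v ≠ 0 := by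
      intro h0
      exact hk (hz (k, v) (PySem.Dict.mem_items_of_get?_eq_some c hv) (by simpa using h0))
    have hgetD : c.getD k 0 = v := by simp [PySem.Dict.getD, hv]
    simp only [hc, if_true, hgetD, hvne, if_false]
    unfold insKey rootOf
    simp [hc, hv]
  · have hnone : c.get? k = none := (PySem.Dict.get?_eq_none_iff_contains c k).mpr (by simpa using hc)
    have hitems : (c.insert k 0).items = c.items ++ [(k, 0)] :=
      PySem.Dict.items_insert_of_not_contains c 0 (by simpa using hc)
    have hnk := not_mem_keys_of_not_contains c k (by simpa using hc)
    have hget0 : (c.insert k 0).get? k = some 0 := by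
      rw [show c.insert k 0 = PySem.Dict.mk (c.items ++ [(k, 0)]) from PySem.Dict.ext hitems,
        get?_mk_append_of_not_mem _ _ _ hnk]
      simp [PySem.Dict.get?_mk_cons]
    have hgetD0 : (c.insert k 0).getD k 0 = 0 := by simp [PySem.Dict.getD, hget0]
    have hcont1 : (c.insert k 0).contains k = true := by
      rw [PySem.Dict.contains_eq_isSome_get?, hget0]; rfl
    have hitems2 : ((c.insert k 0).insert k k).items = c.items ++ [(k, k)] := by
      rw [PySem.Dict.items_insert_of_contains _ k hcont1, hitems, List.map_append,
        map_replace_of_not_mem _ _ _ hnk]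
      simp
    have hget2 : ((c.insert k 0).insert k k).get? k = some k := by
      rw [show (c.insert k 0).insert k k = PySem.Dict.mk (c.items ++ [(k, k)]) from
        PySem.Dict.ext hitems2, get?_mk_append_of_not_mem _ _ _ hnk]
      simp [PySem.Dict.get?_mk_cons]
    simp only [hc, Bool.false_eq_true, if_false, hgetD0, if_true]
    unfold insKey rootOf
    simp only [hc, Bool.false_eq_true, if_false, hnone, Option.getD_none]
    exact Prod.ext (PySem.Dict.ext (by simp [hitems2])) (by simp [PySem.Dict.getD, hget2])

-- ===== the A loop =====
theorem loopA1 (lv rv : Int) : ∀ (suf pre : List (Int × Int)) (cnt : PySem.Dict Int Int) (m : Int),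
    ((pre ++ suf).map Prod.fst).Nodup →
    (suf.map Prod.fst).foldl (unionLoopStep lv rv)
        (PySem.Dict.mk (pre.map (relabP rv lv) ++ suf), cnt, m)
      = (PySem.Dict.mk ((pre ++ suf).map (relabP rv lv)),
         ((suf.map (fun p => if p.2 = rv then lv else p.2)).foldl cntStep (cnt, m)).1,
         ((suf.map (fun p => if p.2 = rv then lv else p.2)).foldl cntStep (cnt, m)).2) := by
  intro suf
  induction suf with
  | nil => intro pre cnt m _; simp
  | cons p suf ih =>
    intro pre cnt m hnd
    have hndparts := hnd
    rw [List.map_append, List.map_cons, List.nodup_append] at hndparts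
    obtain ⟨hnd1, hnd2, hdisj⟩ := hndparts
    have hpsuf : p.1 ∉ suf.map Prod.fst := (List.nodup_cons.mp hnd2).1
    have hsuf : ∀ q ∈ suf, q.1 ≠ p.1 := by
      intro q hq he
      exact hpsuf (he ▸ List.mem_map_of_mem hq)
    have hpre : ∀ q ∈ pre.map (relabP rv lv), q.1 ≠ p.1 := by
      intro q hq he
      obtain ⟨q0, hq0, rfl⟩ := List.mem_map.mp hq
      have : q0.1 ∈ pre.map Prod.fst := List.mem_map_of_mem hq0
      exact hdisj _ this _ (List.mem_cons_self ..) (by simpa [relabP] using he)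
    have hnd' : (((pre ++ [p]) ++ suf).map Prod.fst).Nodup := by
      rw [List.append_assoc]; simpa using hnd
    have hget : (PySem.Dict.mk (pre.map (relabP rv lv) ++ p :: suf)).get? p.1 = some p.2 := by
      rw [get?_mk_append_of_not_mem _ _ _ hpre,
        show ((p :: suf) : List (Int × Int)) = (p.1, p.2) :: suf by simp,
        PySem.Dict.get?_mk_cons]
      simp
    have hgetD : (PySem.Dict.mk (pre.map (relabP rv lv) ++ p :: suf)).getD p.1 0 = p.2 := by
      simp [PySem.Dict.getD, hget]
    have hcont : (PySem.Dict.mk (pre.map (relabP rv lv) ++ p :: suf)).contains p.1 = true := by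
      rw [PySem.Dict.contains_eq_isSome_get?, hget]; rfl
    simp only [List.map_cons, List.foldl_cons]
    by_cases hpv : p.2 = rv
    · have hmap : (pre.map (relabP rv lv) ++ p :: suf).map
            (fun q => if (q.1 == p.1) = true then (p.1, lv) else q)
          = (pre ++ [p]).map (relabP rv lv) ++ suf := by
        rw [List.map_append, map_replace_of_not_mem _ _ _ hpre, List.map_cons,
          map_replace_of_not_mem suf p.1 lv hsuf]
        simp [relabP, hpv]
      have hstep : unionLoopStep lv rv
            (PySem.Dict.mk (pre.map (relabP rv lv) ++ p :: suf), cnt, m) p.1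
          = (PySem.Dict.mk ((pre ++ [p]).map (relabP rv lv) ++ suf), cntStep (cnt, m) lv) := by
        unfold unionLoopStep
        simp only [hgetD, hpv, if_true]
        refine Prod.ext ?_ (Prod.ext ?_ ?_)
        · exact PySem.Dict.ext (by
            rw [PySem.Dict.items_insert_of_contains _ lv hcont]
            exact hmap)
        · by_cases h0 : cnt.getD lv 0 = 0 <;> simp [cntStep, h0]
        · by_cases h0 : cnt.getD lv 0 = 0 <;>
            simp [cntStep, h0, PySem.Dict.getD_insert_self]
      rw [hstep]
      have hih := ih (pre ++ [p]) (cntStep (cnt, m) lv).1 (cntStep (cnt, m) lv).2 hnd'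
      rw [show ((cntStep (cnt, m) lv).1, (cntStep (cnt, m) lv).2) = cntStep (cnt, m) lv from rfl] at hih
      rw [hih]
      simp [hpv, List.append_assoc]
    · have hstep : unionLoopStep lv rv
            (PySem.Dict.mk (pre.map (relabP rv lv) ++ p :: suf), cnt, m) p.1
          = (PySem.Dict.mk ((pre ++ [p]).map (relabP rv lv) ++ suf), cntStep (cnt, m) p.2) := by
        unfold unionLoopStep
        simp only [hgetD, hpv, if_false]
        refine Prod.ext ?_ (Prod.ext ?_ ?_)
        · exact PySem.Dict.ext (by
            simp only [PySem.Dict.items]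
            rw [List.map_append, List.map_cons]
            simp [relabP, hpv])
        · by_cases h0 : cnt.getD p.2 0 = 0 <;> simp [cntStep, h0]
        · by_cases h0 : cnt.getD p.2 0 = 0 <;>
            simp [cntStep, h0, PySem.Dict.getD_insert_self]
      rw [hstep]
      have hih := ih (pre ++ [p]) (cntStep (cnt, m) p.2).1 (cntStep (cnt, m) p.2).2 hnd'
      rw [show ((cntStep (cnt, m) p.2).1, (cntStep (cnt, m) p.2).2) = cntStep (cnt, m) p.2 from rfl] at hih
      rw [hih]
      simp [hpv, List.append_assoc]

theorem cntRun : ∀ (l : List Int) (cnt : PySem.Dict Int Int) (m : Int),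
    (∀ v, cnt.getD v 0 ≤ m) →
    (l.foldl cntStep (cnt, m)).2
      = (l.map (fun v => cnt.getD v 0 + (l.count v : Int))).foldl max m := by
  intro l
  induction l with
  | nil => intro cnt m _; simp
  | cons x t ih =>
    intro cnt m hm
    simp only [List.foldl_cons, List.map_cons]
    rw [show cntStep (cnt, m) x = (cnt.insert x (cnt.getD x 0 + 1), max m (cnt.getD x 0 + 1)) from rfl]
    have hm1 : ∀ v, (cnt.insert x (cnt.getD x 0 + 1)).getD v 0 ≤ max m (cnt.getD x 0 + 1) := by
      intro v
      by_cases hv : v = x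
      · subst hv; rw [PySem.Dict.getD_insert_self]; exact le_max_right _ _
      · rw [PySem.Dict.getD_insert_of_ne _ _ _ hv]
        exact le_trans (hm v) (le_max_left _ _)
    rw [ih _ _ hm1]
    have hg : t.map (fun v => (cnt.insert x (cnt.getD x 0 + 1)).getD v 0 + (t.count v : Int))
        = t.map (fun v => cnt.getD v 0 + ((x :: t).count v : Int)) := by
      apply List.map_congr_left
      intro v hv
      by_cases hvx : v = x
      · subst hvx
        rw [PySem.Dict.getD_insert_self]
        simp [List.count_cons]
        push_cast; ring
      · rw [PySem.Dict.getD_insert_of_ne _ _ _ hvx]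
        have hxv : ¬x = v := fun h => hvx h.symm
        simp [List.count_cons, hxv]
    rw [hg]
    by_cases hx : x ∈ t
    · refine (foldl_max_seed_eq _ _ _ ?_ ?_).symm
      · refine max_le (le_max_left _ _) (le_trans ?_ (le_max_right _ _))
        have h1 : 0 < (x :: t).count x := List.count_pos_iff.mpr (List.mem_cons_self ..)
        have : (1 : Int) ≤ ((x :: t).count x : Int) := by exact_mod_cast h1
        omega
      · refine max_le (le_trans (le_max_left _ _) (PySem.List.le_foldl_max _ _).1) ?_
        exact (PySem.List.le_foldl_max _ _).2 _ (List.mem_map_of_mem hx)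
    · have hc1 : ((x :: t).count x : Int) = 1 := by
        simp [List.count_cons, List.count_eq_zero_of_not_mem hx]
      rw [hc1]

theorem hz_insKey (c : PySem.Dict Int Int) (k : Int)
    (hz : ∀ p ∈ c.items, p.2 = 0 → p.1 = 0) (hk : k ≠ 0) :
    ∀ p ∈ (insKey c k).items, p.2 = 0 → p.1 = 0 := by
  rw [items_insKey]
  by_cases hc : c.contains k = true
  · simpa [hc] using hz
  · have hc' : c.contains k = false := by simpa using hc
    simp only [hc', Bool.false_eq_true, if_false]
    intro p hp
    rcases List.mem_append.mp hp with h | h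
    · exact hz p h
    · simp only [List.mem_singleton] at h
      subst h
      intro h0
      exact absurd h0 hk

theorem unionCircle_eq (c : PySem.Dict Int Int) (a b : Int)
    (hnd : c.keys.Nodup) (hz : ∀ p ∈ c.items, p.2 = 0 → p.1 = 0)
    (ha : a ≠ 0) (hb : b ≠ 0) :
    unionCircle c a b
      = (relabelD (rootOf (insKey c a) b) (rootOf c a) (insKey (insKey c a) b),
         maxFiber (relabelD (rootOf (insKey c a) b) (rootOf c a) (insKey (insKey c a) b))) := by
  have hz1 := hz_insKey c a hz ha
  have hnd1 : (insKey c a).keys.Nodup := nodup_keys_insKey _ _ hnd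
  have hnd2 : (insKey (insKey c a) b).keys.Nodup := nodup_keys_insKey _ _ hnd1
  unfold unionCircle
  rw [findCircle_eq c a hz ha]
  simp only
  rw [findCircle_eq (insKey c a) b hz1 hb]
  simp only
  set lv := rootOf c a with hlv
  set rv := rootOf (insKey c a) b with hrv
  set c2 := insKey (insKey c a) b with hc2
  have hemp : (PySem.Dict.empty : PySem.Dict Int Int).contains lv = false := by
    simp [PySem.Dict.contains, PySem.Dict.empty]
  simp only [hemp, Bool.false_eq_true, if_false]
  set cnt1 := (PySem.Dict.empty : PySem.Dict Int Int).insert lv 0 with hcnt1def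
  set cnt2e := if cnt1.contains rv = true then cnt1 else cnt1.insert rv 0 with hcnt2def
  have hcnt1 : ∀ v, cnt1.getD v 0 = 0 := by
    intro v
    by_cases hv : v = lv
    · subst hv; rw [hcnt1def, PySem.Dict.getD_insert_self]
    · rw [hcnt1def, PySem.Dict.getD_insert_of_ne _ _ _ hv]
      simp [PySem.Dict.getD, PySem.Dict.get?, PySem.Dict.empty]
  have hcnt2 : ∀ v, cnt2e.getD v 0 = 0 := by
    intro v
    rw [hcnt2def]
    split
    · exact hcnt1 v
    · by_cases hv : v = rv
      · subst hv; rw [PySem.Dict.getD_insert_self]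
      · rw [PySem.Dict.getD_insert_of_ne _ _ _ hv]; exact hcnt1 v
  have hmax0 : max (cnt2e.getD lv 0) (cnt2e.getD rv 0) = 0 := by rw [hcnt2, hcnt2]; simp
  have hkeys : c2.keys = c2.items.map Prod.fst := rfl
  have hndit : (([] ++ c2.items).map Prod.fst).Nodup := by simpa using hnd2
  have hloop := loopA1 lv rv c2.items [] cnt2e 0 hndit
  simp only [List.nil_append, List.map_nil] at hloop
  rw [show PySem.Dict.mk c2.items = c2 from rfl] at hloop
  rw [hkeys, hmax0, hloop]
  have hrun := cntRun (c2.items.map (fun p => if p.2 = rv then lv else p.2)) cnt2e 0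
    (fun v => le_of_eq (hcnt2 v))
  simp only
  rw [hrun]
  have hvals : (relabelD rv lv c2).values = c2.items.map (fun p => if p.2 = rv then lv else p.2) := by
    rw [values_relabelD]
    simp [PySem.Dict.values, List.map_map, Function.comp_def]
  refine Prod.ext rfl ?_
  simp only [maxFiber, hvals]
  congr 1
  apply List.map_congr_left
  intro v _
  rw [hcnt2]
  simp

-- ===== the B relabel fold =====
theorem relabelFold (lv : Int) : ∀ (ml : List Int) (d : PySem.Dict Int Int),
    (∀ k ∈ ml, d.contains k = true) →
    ml.foldl (fun r k => r.insert k lv) d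
      = PySem.Dict.mk (d.items.map (fun p => if p.1 ∈ ml then (p.1, lv) else p)) := by
  intro ml
  induction ml with
  | nil =>
    intro d _
    simp only [List.foldl_nil, List.not_mem_nil, if_false]
    exact (PySem.Dict.ext (by simp)).symm
  | cons k t ih =>
    intro d hall
    simp only [List.foldl_cons]
    rw [ih (d.insert k lv) (fun j hj => by
      rw [PySem.Dict.contains_insert]
      simp [hall j (List.mem_cons_of_mem _ hj)])]
    refine PySem.Dict.ext ?_
    simp only [PySem.Dict.items]
    rw [PySem.Dict.items_insert_of_contains _ lv (hall k (List.mem_cons_self ..)), List.map_map]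
    apply List.map_congr_left
    intro p _
    simp only [Function.comp_apply]
    by_cases hpk : p.1 = k
    · simp only [hpk, beq_self_eq_true, if_true]
      by_cases hpt : k ∈ t <;> simp [hpt]
    · have : (p.1 == k) = false := by simpa using hpk
      simp only [this, Bool.false_eq_true, if_false, List.mem_cons]
      by_cases hpt : p.1 ∈ t <;> simp [hpt, hpk]

theorem relabelFold_eq_relabelD (lv rv : Int) (ml : List Int) (d : PySem.Dict Int Int)
    (hnd : d.keys.Nodup) (hml : ∀ k, k ∈ ml ↔ d.get? k = some rv) :
    ml.foldl (fun r k => r.insert k lv) d = relabelD rv lv d := by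
  rw [relabelFold lv ml d (fun k hk => by
    rw [PySem.Dict.contains_eq_isSome_get?, (hml k).mp hk]; rfl)]
  unfold relabelD
  refine PySem.Dict.ext ?_
  simp only [PySem.Dict.items]
  apply List.map_congr_left
  intro p hp
  have hget : d.get? p.1 = some p.2 :=
    PySem.Dict.get?_of_mem_items d (k := p.1) (v := p.2) (by simpa using hp) hnd
  have hiff : p.1 ∈ ml ↔ p.2 = rv := by
    rw [hml p.1, hget]
    simp
  by_cases hpv : p.2 = rv
  · simp [relabP, hpv, hiff.mpr hpv]
  · have hnm : p.1 ∉ ml := fun h => hpv (hiff.mp h)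
    simp [relabP, hpv, hnm]

-- ===== counting fibers =====
theorem fiberLen (c : PySem.Dict Int Int) (r : Int) (l : List Int)
    (hnd : c.keys.Nodup) (hl : l.Nodup) (hchar : ∀ j, j ∈ l ↔ c.get? j = some r) :
    l.length = (c.values).count r := by
  have hcount : (c.values).count r = (c.items.filter (fun p => p.2 == r)).length := by
    simp only [PySem.Dict.values, List.count_eq_countP, List.countP_map]
    rw [List.countP_eq_length_filter]
    rfl
  have hnd2 : ((c.items.filter (fun p => p.2 == r)).map Prod.fst).Nodup := by
    have hsub : ((c.items.filter (fun p => p.2 == r)).map Prod.fst).Sublist c.keys :=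
      List.Sublist.map _ List.filter_sublist
    exact hsub.nodup hnd
  have hmem : ∀ j, j ∈ (c.items.filter (fun p => p.2 == r)).map Prod.fst ↔ j ∈ l := by
    intro j
    rw [hchar j]
    constructor
    · rintro hj
      obtain ⟨p, hp, rfl⟩ := List.mem_map.mp hj
      have hpi := List.mem_of_mem_filter hp
      have hpr : p.2 = r := by simpa using List.of_mem_filter hp
      rw [PySem.Dict.get?_of_mem_items c (k := p.1) (v := p.2) (by simpa using hpi) hnd, hpr]
    · intro hj
      have := PySem.Dict.mem_items_of_get?_eq_some c hj
      exact List.mem_map.mpr ⟨(j, r), List.mem_filter.mpr ⟨this, by simp⟩, rfl⟩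
  have hperm : ((c.items.filter (fun p => p.2 == r)).map Prod.fst).Perm l :=
    (List.perm_ext_iff_of_nodup hnd2 hl).mpr hmem
  rw [hcount, ← hperm.length_eq, List.length_map]

theorem bestOf_nonneg' (mem : PySem.Dict Int (List Int)) : 0 ≤ bestOf mem :=
  (PySem.List.le_foldl_max _ _).1

theorem len_le_bestOf' (mem : PySem.Dict Int (List Int)) (r : Int) (l : List Int)
    (h : mem.get? r = some l) : (l.length : Int) ≤ bestOf mem :=
  (PySem.List.le_foldl_max _ _).2 _ (List.mem_map_of_mem (mem_values_of_get? mem r l h))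

theorem maxFiber_eq_bestOf (c : PySem.Dict Int Int) (mem : PySem.Dict Int (List Int))
    (h : InvCM c mem) : maxFiber c = bestOf mem := by
  obtain ⟨hndc, hndm, _hz, _hvk, hsome, hnone⟩ := h
  refine le_antisymm ?_ ?_
  · rw [maxFiber, foldl_max_le_iff]
    refine ⟨bestOf_nonneg' mem, ?_⟩
    intro x hx
    obtain ⟨v, hv, rfl⟩ := List.mem_map.mp hx
    obtain ⟨k, hk⟩ := exists_get?_of_mem_values c v hndc hv
    cases hml : mem.get? v with
    | none => exact absurd hk (hnone v hml k)
    | some l =>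
      obtain ⟨_, hlnd, hchar⟩ := hsome v l hml
      rw [← fiberLen c v l hndc hlnd hchar]
      exact len_le_bestOf' mem v l hml
  · rw [bestOf, foldl_max_le_iff]
    constructor
    · exact le_trans (PySem.List.le_foldl_max _ _).1 le_rfl
    · intro x hx
      obtain ⟨l, hl, rfl⟩ := List.mem_map.mp hx
      obtain ⟨r, hr⟩ := exists_get?_of_mem_values mem l hndm hl
      obtain ⟨hlne, hlnd, hchar⟩ := hsome r l hr
      obtain ⟨j, hj⟩ := List.exists_mem_of_ne_nil l hlne
      have hjr : c.get? j = some r := (hchar j).mp hj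
      have hrv : r ∈ c.values := mem_values_of_get? c j r hjr
      rw [fiberLen c r l hndc hlnd hchar]
      exact (PySem.List.le_foldl_max _ _).2 _ (List.mem_map_of_mem hrv)

-- ===== bestOf facts =====
theorem bestOf_le_iff (mem : PySem.Dict Int (List Int)) (z : Int) :
    bestOf mem ≤ z ↔ 0 ≤ z ∧ ∀ l ∈ mem.values, (l.length : Int) ≤ z := by
  rw [bestOf, foldl_max_le_iff]
  constructor
  · rintro ⟨h0, hall⟩
    exact ⟨h0, fun l hl => hall _ (List.mem_map_of_mem hl)⟩
  · rintro ⟨h0, hall⟩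
    refine ⟨h0, fun x hx => ?_⟩
    obtain ⟨l, hl, rfl⟩ := List.mem_map.mp hx
    exact hall l hl

theorem bestOf_insert_fresh (mem : PySem.Dict Int (List Int)) (k : Int) (l : List Int)
    (h : mem.contains k = false) :
    bestOf (mem.insert k l) = max (bestOf mem) (l.length : Int) := by
  have hitems := PySem.Dict.items_insert_of_not_contains mem l h
  simp only [bestOf, PySem.Dict.values, hitems, List.map_append, List.foldl_append]
  simp

-- ===== per-query invariant steps =====
theorem insKey_inv (c : PySem.Dict Int Int) (mem : PySem.Dict Int (List Int)) (k : Int)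
    (h : InvCM c mem) (hk : k ≠ 0) (hc : c.contains k = false) :
    InvCM (insKey c k) (mem.insert k [k]) ∧ mem.contains k = false := by
  obtain ⟨hndc, hndm, hz, hvk, hsome, hnoneInv⟩ := h
  have hknotin : k ∉ c.keys := by
    intro hmem
    simp only [PySem.Dict.keys, List.mem_map] at hmem
    obtain ⟨p, hp, he⟩ := hmem
    exact not_mem_keys_of_not_contains c k hc p hp he
  have hcnone : c.get? k = none := (PySem.Dict.get?_eq_none_iff_contains c k).mpr hc
  have hget : ∀ j, (insKey c k).get? j = if j = k then some k else c.get? j := by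
    intro j
    rw [get?_insKey]
    by_cases hj : j = k <;> simp [hj, hcnone]
  have hmemk : mem.get? k = none := by
    cases hml : mem.get? k with
    | none => rfl
    | some l =>
      obtain ⟨hlne, _, hchar⟩ := hsome k l hml
      obtain ⟨j, hj⟩ := List.exists_mem_of_ne_nil l hlne
      have hcj := (hchar j).mp hj
      have hkk : k ∈ c.keys :=
        hvk (j, k) (PySem.Dict.mem_items_of_get?_eq_some c hcj)
      exact absurd hkk hknotin
  have hmemcont : mem.contains k = false := by
    rw [PySem.Dict.contains_eq_isSome_get?, hmemk]; rfl
  have hmget : ∀ r, (mem.insert k [k]).get? r = if r = k then some [k] else mem.get? r := by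
    intro r
    by_cases hr : r = k
    · simp [hr, PySem.Dict.get?_insert_self]
    · simp [hr, PySem.Dict.get?_insert_of_ne _ _ hr]
  have hkeys' : (insKey c k).keys = c.keys ++ [k] := by rw [keys_insKey]; simp [hc]
  refine ⟨⟨nodup_keys_insKey c k hndc, PySem.Dict.nodup_keys_insert _ _ _ hndm,
    hz_insKey c k hz hk, ?_, ?_, ?_⟩, hmemcont⟩
  · intro p hp
    rw [items_insKey] at hp
    simp only [hc, Bool.false_eq_true, if_false] at hp
    rw [hkeys']
    rcases List.mem_append.mp hp with h | h
    · exact List.mem_append.mpr (Or.inl (hvk p h))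
    · simp only [List.mem_singleton] at h
      subst h
      simp
  · intro r l hmr
    rw [hmget r] at hmr
    by_cases hr : r = k
    · rw [hr] at hmr ⊢
      simp only [if_true] at hmr
      obtain rfl : [k] = l := by simpa using hmr
      refine ⟨by simp, by simp, ?_⟩
      intro j
      rw [hget j]
      by_cases hj : j = k
      · simp [hj]
      · simp only [hj, if_false, List.mem_singleton]
        constructor
        · intro h; exact h.elim
        · intro hcj
          have hkk : k ∈ c.keys :=
            hvk (j, k) (PySem.Dict.mem_items_of_get?_eq_some c hcj)
          exact absurd hkk hknotin
    · simp only [hr, if_false] at hmr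
      obtain ⟨hlne, hlnd, hchar⟩ := hsome r l hmr
      refine ⟨hlne, hlnd, ?_⟩
      intro j
      rw [hget j]
      by_cases hj : j = k
      · rw [hj]
        simp only [if_pos rfl]
        constructor
        · intro hjl
          have := (hchar k).mp hjl
          simp [hcnone] at this
        · intro hsome'
          obtain hkr : k = r := by simpa using hsome'
          exact absurd hkr.symm hr
      · simp only [hj, if_false]
        exact hchar j
  · intro r hmr j
    rw [hmget r] at hmr
    by_cases hr : r = k
    · simp [hr] at hmr
    · simp only [hr, if_false] at hmr
      rw [hget j]
      by_cases hj : j = k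
      · simp only [hj, if_true]
        intro hsome'
        obtain hkr : k = r := by simpa using hsome'
        exact absurd hkr.symm hr
      · simp only [hj, if_false]
        exact hnoneInv r hmr j

theorem merge_inv (c : PySem.Dict Int Int) (mem : PySem.Dict Int (List Int))
    (ra rb : Int) (la ml : List Int)
    (h : InvCM c mem) (hra : ra ≠ 0) (hne : ra ≠ rb)
    (hla : mem.get? ra = some la) (hml : mem.get? rb = some ml) :
    InvCM (relabelD rb ra c) ((mem.insert ra (la ++ ml)).erase rb) ∧
    ∀ r l', ((mem.insert ra (la ++ ml)).erase rb).get? r = some l' →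
      (l'.length : Int) ≤ max (bestOf mem) ((la ++ ml).length : Int) := by
  obtain ⟨hndc, hndm, hz, hvk, hsome, hnoneInv⟩ := h
  obtain ⟨hlane, hland, hlachar⟩ := hsome ra la hla
  obtain ⟨hmlne, hmlnd, hmlchar⟩ := hsome rb ml hml
  have hrakeys : ra ∈ c.keys := by
    obtain ⟨j, hj⟩ := List.exists_mem_of_ne_nil la hlane
    exact hvk (j, ra) (PySem.Dict.mem_items_of_get?_eq_some c ((hlachar j).mp hj))
  have hget' : ∀ r, ((mem.insert ra (la ++ ml)).erase rb).get? r
      = if r = rb then none else if r = ra then some (la ++ ml) else mem.get? r := by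
    intro r
    rw [get?_erase]
    by_cases hr : r = rb
    · simp [hr]
    · simp only [hr, if_false]
      by_cases hr2 : r = ra
      · simp [hr2, PySem.Dict.get?_insert_self]
      · simp [hr2, PySem.Dict.get?_insert_of_ne _ _ hr2]
  have hgc : ∀ j, (relabelD rb ra c).get? j
      = (c.get? j).map (fun v => if v = rb then ra else v) := get?_relabelD rb ra c
  constructor
  · refine ⟨by rw [keys_relabelD]; exact hndc,
      nodup_keys_erase _ _ (PySem.Dict.nodup_keys_insert _ _ _ hndm), ?_, ?_, ?_, ?_⟩
    · intro p' hp'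
      simp only [relabelD, PySem.Dict.items, List.mem_map] at hp'
      obtain ⟨p, hp, rfl⟩ := hp'
      simp only [relabP]
      by_cases hpv : p.2 = rb
      · simp only [hpv, if_true]
        intro h0
        exact absurd h0 hra
      · simp only [hpv, if_false]
        exact hz p hp
    · intro p' hp'
      simp only [relabelD, PySem.Dict.items, List.mem_map] at hp'
      obtain ⟨p, hp, rfl⟩ := hp'
      rw [keys_relabelD]
      simp only [relabP]
      by_cases hpv : p.2 = rb
      · simpa [hpv] using hrakeys
      · simpa [hpv] using hvk p hp
    · intro r l' hmr
      rw [hget' r] at hmr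
      by_cases hr : r = rb
      · simp [hr] at hmr
      · simp only [hr, if_false] at hmr
        by_cases hr2 : r = ra
        · rw [hr2] at hmr ⊢
          obtain rfl : la ++ ml = l' := by simpa using hmr
          refine ⟨by simp [hlane], ?_, ?_⟩
          · rw [List.nodup_append]
            refine ⟨hland, hmlnd, ?_⟩
            intro x hx y hy hxy
            subst hxy
            have h1 := (hlachar x).mp hx
            have h2 := (hmlchar x).mp hy
            rw [h1] at h2
            exact hne (by simpa using h2)
          · intro j
            rw [hgc j, List.mem_append]
            constructor
            · rintro (hj | hj)
              · rw [(hlachar j).mp hj]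
                simp only [Option.map_some]
                simp [hne]
              · rw [(hmlchar j).mp hj]
                simp
            · intro hj
              simp only [Option.map_eq_some_iff] at hj
              obtain ⟨v, hv, hfv⟩ := hj
              by_cases hvrb : v = rb
              · subst hvrb
                exact Or.inr ((hmlchar j).mpr hv)
              · simp only [hvrb, if_false] at hfv
                subst hfv
                exact Or.inl ((hlachar j).mpr hv)
        · simp only [hr2, if_false] at hmr
          obtain ⟨hlne, hlnd, hchar⟩ := hsome r l' hmr
          refine ⟨hlne, hlnd, ?_⟩
          intro j
          rw [hgc j, hchar j]
          constructor
          · intro hcj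
            rw [hcj]
            simp only [Option.map_some]
            have : r ≠ rb := hr
            simp [this]
          · intro hj
            simp only [Option.map_eq_some_iff] at hj
            obtain ⟨v, hv, hfv⟩ := hj
            by_cases hvrb : v = rb
            · subst hvrb
              simp only [if_true] at hfv
              exact absurd hfv.symm hr2
            · simp only [hvrb, if_false] at hfv
              subst hfv
              exact hv
    · intro r hmr j
      rw [hget' r] at hmr
      rw [hgc j]
      by_cases hr : r = rb
      · rw [hr]
        intro hj
        simp only [Option.map_eq_some_iff] at hj
        obtain ⟨v, _, hfv⟩ := hj
        by_cases hvrb : v = rb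
        · rw [if_pos hvrb] at hfv
          exact hne hfv
        · rw [if_neg hvrb] at hfv
          exact hvrb hfv
      · simp only [hr, if_false] at hmr
        by_cases hr2 : r = ra
        · simp [hr2] at hmr
        · simp only [hr2, if_false] at hmr
          intro hj
          simp only [Option.map_eq_some_iff] at hj
          obtain ⟨v, hv, hfv⟩ := hj
          by_cases hvrb : v = rb
          · simp only [hvrb, if_true] at hfv
            exact hr2 hfv.symm
          · simp only [hvrb, if_false] at hfv
            exact hnoneInv r hmr j (hfv ▸ hv)
  · intro r l' hmr
    rw [hget' r] at hmr
    by_cases hr : r = rb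
    · simp [hr] at hmr
    · simp only [hr, if_false] at hmr
      by_cases hr2 : r = ra
      · simp only [hr2, if_true] at hmr
        obtain rfl : la ++ ml = l' := by simpa using hmr
        exact le_max_right _ _
      · simp only [hr2, if_false] at hmr
        exact le_trans (len_le_bestOf' mem r l' hmr) (le_max_left _ _)

theorem step_eq (q : List Int) (c : PySem.Dict Int Int) (mem : PySem.Dict Int (List Int))
    (ans : List Int)
    (hq2 : 2 ≤ q.length) (hq0 : q.getD 0 0 ≠ 0) (hq1 : q.getD 1 0 ≠ 0)
    (hInv : InvCM c mem) :
    ∃ mem',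
      altStep (c, mem, bestOf mem, ans) q
        = ((unionCircle c (PySem.List.pyGetD q 0 0) (PySem.List.pyGetD q 1 0)).1, mem',
           (unionCircle c (PySem.List.pyGetD q 0 0) (PySem.List.pyGetD q 1 0)).2,
           ans ++ [(unionCircle c (PySem.List.pyGetD q 0 0) (PySem.List.pyGetD q 1 0)).2]) ∧
      InvCM (unionCircle c (PySem.List.pyGetD q 0 0) (PySem.List.pyGetD q 1 0)).1 mem' ∧
      (unionCircle c (PySem.List.pyGetD q 0 0) (PySem.List.pyGetD q 1 0)).2 = bestOf mem' := by
  have ha : PySem.List.pyGetD q 0 0 ≠ 0 := by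
    rw [show (0 : Int) = ((0 : Nat) : Int) from rfl, PySem.List.pyGetD_natCast]
    exact hq0
  have hb : PySem.List.pyGetD q 1 0 ≠ 0 := by
    rw [show (1 : Int) = ((1 : Nat) : Int) from rfl, PySem.List.pyGetD_natCast]
    exact hq1
  set a := PySem.List.pyGetD q 0 0 with hadef
  set b := PySem.List.pyGetD q 1 0 with hbdef
  have hInv0 := hInv
  obtain ⟨hndc, hndm, hz, hvk, hsome, hnoneInv⟩ := hInv0
  -- the two presence steps
  set c1 := insKey c a with hc1def
  set mem1 := if c.contains a = true then mem else mem.insert a [a] with hmem1def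
  have hrm1 : (if c.contains a = true then (c, mem)
      else (c.insert a a, mem.insert a [a])) = (c1, mem1) := by
    by_cases hca : c.contains a = true
    · simp [hca, hc1def, insKey, hmem1def]
    · have hca' : c.contains a = false := by simpa using hca
      have hci : c.insert a a = c1 := PySem.Dict.ext (by
        rw [PySem.Dict.items_insert_of_not_contains c a hca', hc1def, items_insKey]
        simp [hca'])
      rw [if_neg hca, hmem1def, if_neg hca, hci]
  have hInv1 : InvCM c1 mem1 := by
    by_cases hca : c.contains a = true
    · rw [hc1def, hmem1def]
      simpa [insKey, hca] using hInv
    · have hca' : c.contains a = false := by simpa using hca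
      rw [hc1def, hmem1def]
      simp only [hca, if_false]
      exact (insKey_inv c mem a hInv ha hca').1
  have hmem1pres : ∀ r l, mem.get? r = some l → mem1.get? r = some l := by
    intro r l hrl
    rw [hmem1def]
    by_cases hca : c.contains a = true
    · simp [hca, hrl]
    · have hca' : c.contains a = false := by simpa using hca
      have hmf := (insKey_inv c mem a hInv ha hca').2
      have hmn : mem.get? a = none := by
        rw [PySem.Dict.get?_eq_none_iff_contains]; exact hmf
      have hra : r ≠ a := by
        intro he; rw [he, hmn] at hrl; simp at hrl
      simp [hca, PySem.Dict.get?_insert_of_ne _ _ hra, hrl]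
  have hbest1 : bestOf mem1 = bestOf mem ∨ bestOf mem1 = max (bestOf mem) 1 := by
    rw [hmem1def]
    by_cases hca : c.contains a = true
    · left; rw [if_pos hca]
    · have hca' : c.contains a = false := by simpa using hca
      have hmf := (insKey_inv c mem a hInv ha hca').2
      right
      rw [if_neg hca]
      simpa using bestOf_insert_fresh mem a [a] hmf
  obtain ⟨hndc1, hndm1, hz1, hvk1, hsome1, hnoneInv1⟩ := id hInv1
  set c2 := insKey c1 b with hc2def
  set mem2 := if c1.contains b = true then mem1 else mem1.insert b [b] with hmem2def
  have hrm2 : (if c1.contains b = true then (c1, mem1)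
      else (c1.insert b b, mem1.insert b [b])) = (c2, mem2) := by
    by_cases hcb : c1.contains b = true
    · simp [hcb, hc2def, insKey, hmem2def]
    · have hcb' : c1.contains b = false := by simpa using hcb
      have hci : c1.insert b b = c2 := by
        rw [hc2def]
        unfold insKey
        rw [if_neg hcb]
        exact PySem.Dict.ext (PySem.Dict.items_insert_of_not_contains c1 b hcb')
      rw [if_neg hcb, hmem2def, if_neg hcb, hci]
  have hInv2 : InvCM c2 mem2 := by
    by_cases hcb : c1.contains b = true
    · rw [hc2def, hmem2def]
      simpa [insKey, hcb] using hInv1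
    · have hcb' : c1.contains b = false := by simpa using hcb
      rw [hc2def, hmem2def]
      simp only [hcb, if_false]
      exact (insKey_inv c1 mem1 b hInv1 hb hcb').1
  have hmem2pres : ∀ r l, mem1.get? r = some l → mem2.get? r = some l := by
    intro r l hrl
    rw [hmem2def]
    by_cases hcb : c1.contains b = true
    · simp [hcb, hrl]
    · have hcb' : c1.contains b = false := by simpa using hcb
      have hmf := (insKey_inv c1 mem1 b hInv1 hb hcb').2
      have hmn : mem1.get? b = none := by
        rw [PySem.Dict.get?_eq_none_iff_contains]; exact hmf
      have hrb : r ≠ b := by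
        intro he; rw [he, hmn] at hrl; simp at hrl
      simp [hcb, PySem.Dict.get?_insert_of_ne _ _ hrb, hrl]
  have hbest2 : bestOf mem2 = bestOf mem ∨ bestOf mem2 = max (bestOf mem) 1 := by
    rw [hmem2def]
    by_cases hcb : c1.contains b = true
    · rw [if_pos hcb]; exact hbest1
    · have hcb' : c1.contains b = false := by simpa using hcb
      have hmf := (insKey_inv c1 mem1 b hInv1 hb hcb').2
      right
      rw [if_neg hcb]
      rw [show bestOf (mem1.insert b [b]) = max (bestOf mem1) 1 by
        simpa using bestOf_insert_fresh mem1 b [b] hmf]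
      rcases hbest1 with h | h <;> rw [h]
      · rw [max_assoc]; simp
  obtain ⟨hndc2, hndm2, hz2, hvk2, hsome2, hnoneInv2⟩ := id hInv2
  set lv := rootOf c a with hlvdef
  set rv := rootOf c1 b with hrvdef
  -- the two root reads
  have hc1a : c1.get? a = some lv := by
    rw [hc1def, get?_insKey]
    simp [hlvdef, rootOf]
  have hc2a : c2.get? a = some lv := by
    rw [hc2def, get?_insKey]
    by_cases hab : a = b
    · rw [if_pos hab, ← hab, hc1a]
      simp
    · rw [if_neg hab]
      exact hc1a
  have hc2b : c2.get? b = some rv := by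
    rw [hc2def, get?_insKey]
    simp [hrvdef, rootOf]
  have hra : c2.getD a 0 = lv := by simp [PySem.Dict.getD, hc2a]
  have hrb : c2.getD b 0 = rv := by simp [PySem.Dict.getD, hc2b]
  have hlv0 : lv ≠ 0 := by
    intro h0
    exact ha (hz2 (a, lv) (PySem.Dict.mem_items_of_get?_eq_some c2 hc2a) (by simpa using h0))
  -- A's union characterized
  have hU : unionCircle c a b = (relabelD rv lv c2, maxFiber (relabelD rv lv c2)) := by
    rw [unionCircle_eq c a b hndc hz ha hb]
  -- roots are present in mem2
  have hmla : ∃ la, mem2.get? lv = some la := by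
    cases hml : mem2.get? lv with
    | none => exact absurd hc2a (hnoneInv2 lv hml a)
    | some la => exact ⟨la, rfl⟩
  have hmlb : ∃ ml, mem2.get? rv = some ml := by
    cases hml : mem2.get? rv with
    | none => exact absurd hc2b (hnoneInv2 rv hml b)
    | some ml => exact ⟨ml, rfl⟩
  obtain ⟨la, hla⟩ := hmla
  obtain ⟨ml, hml⟩ := hmlb
  have hgla : mem2.getD lv [] = la := by simp [PySem.Dict.getD, hla]
  have hglb : mem2.getD rv [] = ml := by simp [PySem.Dict.getD, hml]
  obtain ⟨hlane, hland, hlachar⟩ := hsome2 lv la hla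
  obtain ⟨hmlne, hmlnd, hmlchar⟩ := hsome2 rv ml hml
  -- unfold B's step
  simp only [altStep, ← hadef, ← hbdef]
  rw [hrm1]
  simp only
  rw [hrm2]
  simp only [hra, hrb]
  by_cases hne : lv ≠ rv
  · -- merge branch
    set mem' := (mem2.insert lv (la ++ ml)).erase rv with hmem'def
    have hroot' : ml.foldl (fun r k => r.insert k lv) c2 = relabelD rv lv c2 :=
      relabelFold_eq_relabelD lv rv ml c2 hndc2 (fun k => hmlchar k)
    obtain ⟨hInv', hbound⟩ := merge_inv c2 mem2 lv rv la ml
      ⟨hndc2, hndm2, hz2, hvk2, hsome2, hnoneInv2⟩ hlv0 hne hla hml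
    have hget'lv : mem'.get? lv = some (la ++ ml) := by
      rw [hmem'def, get?_erase, if_neg hne, PySem.Dict.get?_insert_self]
    have hgd'lv : mem'.getD lv [] = la ++ ml := by simp [PySem.Dict.getD, hget'lv]
    have hL1 : (1 : Int) ≤ ((la ++ ml).length : Int) := by
      have : la.length ≠ 0 := by simpa using hlane
      have hlen : 1 ≤ (la ++ ml).length := by
        rw [List.length_append]; omega
      exact_mod_cast hlen
    have habs : max (bestOf mem2) ((la ++ ml).length : Int)
        = max (bestOf mem) ((la ++ ml).length : Int) := by
      rcases hbest2 with h | h <;> rw [h]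
      rw [max_assoc, max_eq_right hL1]
    have hbestOf' : bestOf mem' = max (bestOf mem) ((la ++ ml).length : Int) := by
      refine le_antisymm ?_ ?_
      · rw [bestOf_le_iff]
        refine ⟨le_trans (bestOf_nonneg' mem) (le_max_left _ _), ?_⟩
        intro l hl
        obtain ⟨r, hr⟩ := exists_get?_of_mem_values mem' l hInv'.2.1 hl
        rw [← habs]
        exact hbound r l hr
      · refine max_le ?_ ?_
        · rw [bestOf_le_iff]
          refine ⟨bestOf_nonneg' mem', ?_⟩
          intro l hl
          obtain ⟨r, hr⟩ := exists_get?_of_mem_values mem l hndm hl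
          have hr2 : mem2.get? r = some l := hmem2pres r l (hmem1pres r l hr)
          by_cases hrlv : r = lv
          · rw [hrlv, hla] at hr2
            obtain rfl : la = l := by simpa using hr2
            refine le_trans ?_ (len_le_bestOf' mem' lv (la ++ ml) hget'lv)
            have : la.length ≤ (la ++ ml).length := by
              rw [List.length_append]; omega
            exact_mod_cast this
          · by_cases hrrv : r = rv
            · rw [hrrv, hml] at hr2
              obtain rfl : ml = l := by simpa using hr2
              refine le_trans ?_ (len_le_bestOf' mem' lv (la ++ ml) hget'lv)
              have : ml.length ≤ (la ++ ml).length := by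
                rw [List.length_append]; omega
              exact_mod_cast this
            · have : mem'.get? r = some l := by
                rw [hmem'def, get?_erase, if_neg hrrv, PySem.Dict.get?_insert_of_ne _ _ hrlv]
                exact hr2
              exact len_le_bestOf' mem' r l this
        · exact len_le_bestOf' mem' lv (la ++ ml) hget'lv
    refine ⟨mem', ?_, ?_, ?_⟩
    · rw [if_pos hne, hU, hgla, hglb, hroot', ← hmem'def, hgd'lv]
      have hmf' : maxFiber (relabelD rv lv c2) = bestOf mem' := maxFiber_eq_bestOf _ _ hInv'
      rw [hmf', hbestOf']
    · rw [hU]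
      exact hInv'
    · rw [hU]
      exact maxFiber_eq_bestOf _ _ hInv'
  · -- no merge: lv = rv
    have heq : lv = rv := by simpa using hne
    have hcc : relabelD rv lv c2 = c2 := by rw [heq]; exact relabelD_self rv c2
    have hmB : maxFiber (relabelD rv lv c2) = bestOf mem2 := by
      rw [hcc]
      exact maxFiber_eq_bestOf _ _ ⟨hndc2, hndm2, hz2, hvk2, hsome2, hnoneInv2⟩
    have hbest' : max (bestOf mem) ((la.length : Int)) = bestOf mem2 := by
      by_cases hca : c.contains a = true
      · -- a present; then b's root equals lv, show mem2 = mem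
        have hcbv : c1 = c := by rw [hc1def]; simp [insKey, hca]
        have hc1b : c1.contains b = true := by
          by_contra hcb
          have hcb' : c1.contains b = false := by simpa using hcb
          -- then rv = b, but lv ∈ c.keys, and b ∉ c.keys
          have hrvb : rv = b := by
            rw [hrvdef, rootOf, (PySem.Dict.get?_eq_none_iff_contains c1 b).mpr hcb']
            rfl
          have hsa : (c.get? a).isSome := by
            rw [← PySem.Dict.contains_eq_isSome_get?]; exact hca
          obtain ⟨v, hv⟩ := Option.isSome_iff_exists.mp hsa
          have hlvv : lv = v := by rw [hlvdef, rootOf, hv]; rfl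
          have hlvk : lv ∈ c.keys := by
            rw [hlvv]
            exact hvk (a, v) (PySem.Dict.mem_items_of_get?_eq_some c hv)
          have hbk : b ∉ c.keys := by
            intro hmemb
            simp only [PySem.Dict.keys, List.mem_map] at hmemb
            obtain ⟨p, hp, he⟩ := hmemb
            rw [← hcbv] at hp
            exact not_mem_keys_of_not_contains c1 b hcb' p (by rw [hcbv] at hp ⊢; exact hp) he
          rw [heq, hrvb] at hlvk
          exact hbk hlvk
        have hmem2eq : mem2 = mem := by
          rw [hmem2def, hmem1def]
          simp [hc1b, hca]
        rw [hmem2eq] at hla ⊢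
        exact max_eq_left (len_le_bestOf' mem lv la hla)
      · -- a fresh: then b = a
        have hca' : c.contains a = false := by simpa using hca
        have hanotk : a ∉ c.keys := by
          intro hmem
          simp only [PySem.Dict.keys, List.mem_map] at hmem
          obtain ⟨p, hp, he⟩ := hmem
          exact not_mem_keys_of_not_contains c a hca' p hp he
        have hlva : lv = a := by
          rw [hlvdef, rootOf, (PySem.Dict.get?_eq_none_iff_contains c a).mpr hca']
          rfl
        have hba : b = a := by
          by_cases hcb : c1.contains b = true
          · -- rv is a value of c1: either old value of c (in c.keys) or a
            have hsb : (c1.get? b).isSome := by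
              rw [← PySem.Dict.contains_eq_isSome_get?]; exact hcb
            obtain ⟨w, hw⟩ := Option.isSome_iff_exists.mp hsb
            have hrvw : rv = w := by rw [hrvdef, rootOf, hw]; rfl
            by_contra hbne
            have hcb2 : c.get? b = some w := by
              have h' := hw
              rw [hc1def, get?_insKey, if_neg hbne] at h'
              exact h'
            have hwk : w ∈ c.keys :=
              hvk (b, w) (PySem.Dict.mem_items_of_get?_eq_some c hcb2)
            rw [← hrvw, ← heq, hlva] at hwk
            exact hanotk hwk
          · have hcb' : c1.contains b = false := by simpa using hcb
            have hrvb : rv = b := by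
              rw [hrvdef, rootOf, (PySem.Dict.get?_eq_none_iff_contains c1 b).mpr hcb']
              rfl
            rw [← hrvb, ← heq, hlva]
        -- b = a, a fresh: mem2 = mem.insert a [a], la = [a]
        have hc1ca : c1.contains a = true := by
          rw [PySem.Dict.contains_eq_isSome_get?, hc1a]; rfl
        have hmem2eq : mem2 = mem.insert a [a] := by
          rw [hmem2def, hmem1def, hba]
          simp [hc1ca, hca]
        have hla2 : la = [a] := by
          have : mem2.get? lv = some [a] := by
            rw [hmem2eq, hlva, PySem.Dict.get?_insert_self]
          rw [this] at hla
          simpa using hla.symm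
        have hmf : mem.contains a = false := (insKey_inv c mem a hInv ha hca').2
        rw [hmem2eq, bestOf_insert_fresh mem a [a] hmf, hla2]
    refine ⟨mem2, ?_, ?_, ?_⟩
    · rw [if_neg hne, hU, hgla, hmB, hbest']
      simp [hcc]
    · rw [hU]
      simp only [hcc]
      exact ⟨hndc2, hndm2, hz2, hvk2, hsome2, hnoneInv2⟩
    · rw [hU]
      exact hmB

theorem main_loop : ∀ (qs : List (List Int)) (c : PySem.Dict Int Int)
    (mem : PySem.Dict Int (List Int)) (ans : List Int),
    (∀ q ∈ qs, 2 ≤ q.length ∧ q.getD 0 0 ≠ 0 ∧ q.getD 1 0 ≠ 0) →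
    InvCM c mem →
    (qs.foldl (fun (s : PySem.Dict Int Int × List Int) query =>
        let friendA := PySem.List.pyGetD query 0 0
        let friendB := PySem.List.pyGetD query 1 0
        let r := unionCircle s.1 friendA friendB
        (r.1, s.2 ++ [r.2])) (c, ans)).2
      = (qs.foldl altStep (c, mem, bestOf mem, ans)).2.2.2 := by
  intro qs
  induction qs with
  | nil => intro c mem ans _ _; rfl
  | cons q qs ih =>
    intro c mem ans hqs hInv
    obtain ⟨hq2, hq0, hq1⟩ := hqs q (List.mem_cons_self ..)
    obtain ⟨mem', htup, hinv', hbest'⟩ := step_eq q c mem ans hq2 hq0 hq1 hInv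
    simp only [List.foldl_cons]
    rw [htup, hbest']
    exact ih _ _ _ (fun r hr => hqs r (List.mem_cons_of_mem _ hr)) hinv'


-- ===== VERDICT (by name: the statement is the Claim_ definition above) =====
theorem max_circle_union_find_array_spec : Claim_equal_max_circle_union_find_array := by
  intro queries _hdom hpre
  unfold Spec_max_circle_union_find_array
  unfold max_circle_union_find_array max_circle_union_find_array_alt
  have h0 : InvCM PySem.Dict.empty PySem.Dict.empty := by
    refine ⟨by simp [PySem.Dict.keys, PySem.Dict.empty], by simp [PySem.Dict.keys, PySem.Dict.empty], ?_, ?_, ?_, ?_⟩ <;>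
      simp [PySem.Dict.empty, PySem.Dict.get?]
  have hb : (0 : Int) = bestOf PySem.Dict.empty := by
    simp [bestOf, PySem.Dict.values, PySem.Dict.empty]
  rw [hb]
  exact main_loop queries PySem.Dict.empty PySem.Dict.empty [] (fun q hq => hpre q hq) h0
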